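-- pv_equiv track=rewrite | github.com/Samara103/file_organizer | src/organizer/dsa_day11.py | group_people
-- ===== SOURCE A (Python) =====
-- def group_people(people):
--     '''
--     Group people by their group size
--     Patterns: hash map, list building
--
--     Parameters:
--         nums (list): list of integers, each index is person ID, each value is group size that person belongs to
--     Returns:
--         list: list of person IDs (indexes) where people share group size specified
--     '''
--     groups = {}
--     output = []
--     for id, size in enumerate(people):
--         if size not in groups:
--             groups[size] = []
--         groups[size].append(id)
--         if len(groups[size])==size:
--             output.append(groups[size])
--             groups[size] = []
--     return output
--     '''freq = {}
--     for i in range(len(people)):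
--         if people[i] in freq:
--             freq[people[i]].append(i)
--         else:
--             freq[people[i]] = [i]
--     output = []
--     group = []
--     while len(freq)>0:
--         size = max(freq)
--         a = freq[size].pop(0)
--         group.append(a)
--         if len(group)==size:
--             output.append(group)
--             group = []
--         if len(freq[size])<=0:
--             freq.pop(size)
--     return output'''
-- ===== SOURCE B (Python) =====
-- def group_people(people):
--     by_size = {}
--     for i, s in enumerate(people):
--         by_size.setdefault(s, []).append(i)
--     chunks = []
--     for s, ids in by_size.items():
--         if s > 0:
--             for k in range(len(ids) // s):
--                 chunks.append(ids[k * s:(k + 1) * s])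
--     chunks.sort(key=lambda c: c[-1])
--     return chunks
-- ===== Notes on version B (the rewrite author's own statement) =====
-- stated objective: alternative
-- what changed: B replaces A's single streaming pass (which keeps a dict of partially-filled groups and emits each group the moment it fills) by a gather-then-chunk-then-sort decomposition: first bucket all ids by group size, then cut each positive-size bucket into consecutive full chunks discarding the incomplete remainder, and finally order the chunks by their last (completing) id, which reproduces A's emit-on-completion order.
import Mathlib
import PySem

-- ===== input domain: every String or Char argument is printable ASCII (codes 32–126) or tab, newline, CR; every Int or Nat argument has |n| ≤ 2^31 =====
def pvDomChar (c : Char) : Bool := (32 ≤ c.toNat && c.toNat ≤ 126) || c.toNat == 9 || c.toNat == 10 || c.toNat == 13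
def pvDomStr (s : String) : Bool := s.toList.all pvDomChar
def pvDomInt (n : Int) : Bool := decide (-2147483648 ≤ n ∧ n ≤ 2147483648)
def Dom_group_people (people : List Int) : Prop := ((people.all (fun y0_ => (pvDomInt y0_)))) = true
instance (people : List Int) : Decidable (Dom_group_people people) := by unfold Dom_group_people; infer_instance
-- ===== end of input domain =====

-- B replaces A's single streaming pass (emit a group the moment it fills) by a
-- gather-then-chunk-then-sort decomposition: bucket all ids by size, cut each bucket
-- into full chunks, and order the chunks by their last (completing) id.

-- ===== PORT A =====
-- one iteration of A's for-loop; state = (groups dict, output list)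
def gpStepA (st : PySem.Dict Int (List Int) × List (List Int)) (p : Int × Int) :
    PySem.Dict Int (List Int) × List (List Int) :=
  let id := p.1
  let size := p.2
  -- if size not in groups: groups[size] = []
  let groups := if st.1.contains size then st.1 else st.1.insert size ([] : List Int)
  -- groups[size].append(id)
  let lst := groups.getD size [] ++ [id]
  let groups := groups.insert size lst
  -- if len(groups[size]) == size: output.append(groups[size]); groups[size] = []
  if (lst.length : Int) = size then (groups.insert size ([] : List Int), st.2 ++ [lst])
  else (groups, st.2)

def group_people (people : List Int) : List (List Int) :=
  ((PySem.List.enumerate people 0).foldl gpStepA (PySem.Dict.empty, [])).2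

-- ===== PORT B =====
def group_people_alt (people : List Int) : List (List Int) :=
  -- by_size = {}; for i, s in enumerate(people): by_size.setdefault(s, []).append(i)
  let bySize := (PySem.List.enumerate people 0).foldl
    (fun d p =>
      let d2 := d.setdefault p.2 ([] : List Int)
      d2.insert p.2 (d2.getD p.2 [] ++ [p.1]))
    PySem.Dict.empty
  -- for s, ids in by_size.items(): if s > 0: for k in range(len(ids) // s): chunks.append(ids[k*s:(k+1)*s])
  let chunks := bySize.items.foldl (fun chunks q =>
    let s := q.1
    let ids := q.2
    if 0 < s then
      (PySem.List.pyRange 0 (PySem.Int.floordiv (ids.length : Int) s) 1).foldl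
        (fun chunks k => chunks ++ [PySem.List.slice ids (some (k * s)) (some ((k + 1) * s))])
        chunks
    else chunks) ([] : List (List Int))
  -- chunks.sort(key=lambda c: c[-1]); every chunk is nonempty, so c[-1] is exactly pyGetD c (-1) _
  PySem.List.sorted chunks (fun c => PySem.List.pyGetD c (-1) 0)

-- ===== PRECONDITION & SPEC =====
def Spec_group_people (people : List Int) (out : List (List Int)) : Prop := out = group_people_alt people
instance (people : List Int) (out : List (List Int)) : Decidable (Spec_group_people people out) := by unfold Spec_group_people; infer_instance

-- ===== CLAIM (what is proved, stated in full; the proofs are below) =====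
def Claim_equal_group_people : Prop := ∀ (people : List Int), Dom_group_people people → Spec_group_people people (group_people people)

-- ===== LEMMAS AND PROOFS =====

-- ids (first components of enumerate) of the occurrences of value s in people
def gpOcc (s : Int) (people : List Int) : List Int :=
  ((PySem.List.enumerate people 0).filter (fun q => q.2 == s)).map (fun q => q.1)

-- the pending (not yet emitted) occurrence ids for size s after A processed people
def gpPend (s : Int) (people : List Int) : List Int :=
  if 0 < s then (gpOcc s people).drop ((gpOcc s people).length - (gpOcc s people).length % s.toNat)
  else gpOcc s people

def gpFoldA (people : List Int) : PySem.Dict Int (List Int) × List (List Int) :=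
  (PySem.List.enumerate people 0).foldl gpStepA (PySem.Dict.empty, [])

-- B's bucket dict (the first loop of B)
def gpDictB (people : List Int) : PySem.Dict Int (List Int) :=
  (PySem.List.enumerate people 0).foldl
    (fun d p =>
      let d2 := d.setdefault p.2 ([] : List Int)
      d2.insert p.2 (d2.getD p.2 [] ++ [p.1]))
    PySem.Dict.empty

-- the full chunks of the bucket of size s
def gpChunksOf (s : Int) (people : List Int) : List (List Int) :=
  if 0 < s then
    (List.range ((gpOcc s people).length / s.toNat)).map
      (fun k => ((gpOcc s people).drop (k * s.toNat)).take s.toNat)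
  else []

def gpAllChunks (people : List Int) : List (List Int) :=
  (PySem.List.dedup people).flatMap (fun s => gpChunksOf s people)

def gpKey (c : List Int) : Int := PySem.List.pyGetD c (-1) 0

-- the chunk (if any) completed by appending one more occurrence of x
def gpNew (x : Int) (people : List Int) : List (List Int) :=
  if 0 < x ∧ ((gpOcc x people).length + 1) % x.toNat = 0 then
    [gpPend x people ++ [(people.length : Int)]]
  else []

lemma gpOcc_append (s x : Int) (people : List Int) :
    gpOcc s (people ++ [x]) = gpOcc s people ++ (if x = s then [(people.length : Int)] else []) := by
  simp only [gpOcc, PySem.List.enumerate_append, PySem.List.enumerate_cons,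
    PySem.List.enumerate_nil, List.filter_append, List.map_append]
  by_cases h : x = s <;> simp [h]

lemma gpOcc_nil_of_not_mem (x : Int) (people : List Int) (hx : x ∉ people) :
    gpOcc x people = [] := by
  simp only [gpOcc, List.map_eq_nil_iff, List.filter_eq_nil_iff]
  intro q hq
  rcases (PySem.List.mem_enumerate_iff _ _ _).1 hq with ⟨k, hk, rfl⟩
  simp only [beq_iff_eq]
  intro h
  exact hx (h ▸ List.getElem_mem hk)

lemma gp_mod_succ (c m : Nat) (hm : 0 < m) :
    (c + 1) % m = if c % m + 1 = m then 0 else c % m + 1 := by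
  have h1 : c % m < m := Nat.mod_lt _ hm
  have h2 : c + 1 = m * (c / m) + (c % m + 1) := by
    have := Nat.div_add_mod c m; omega
  rw [h2, Nat.mul_add_mod]
  split_ifs with h
  · simp [h]
  · exact Nat.mod_eq_of_lt (by omega)

lemma gp_dedup_snoc (l : List Int) (x : Int) :
    PySem.List.dedup (l ++ [x]) = PySem.List.dedup l ++ (if x ∈ l then [] else [x]) := by
  rw [PySem.List.dedup_eq_ofList, PySem.List.dedup_eq_ofList, PySem.Set.ofList_append]
  rw [show (PySem.Set.ofList l).update [x] = (PySem.Set.ofList l).add x from rfl]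
  unfold PySem.Set.add
  by_cases hm : x ∈ l
  · have hc : (PySem.Set.ofList l).contains x = true :=
      (PySem.Set.contains_iff _ _).mpr ((PySem.Set.mem_ofList _ _).mpr hm)
    simp [hc, hm]

  · have hc : ¬ (PySem.Set.ofList l).contains x = true := fun h =>
      hm ((PySem.Set.mem_ofList _ _).mp ((PySem.Set.contains_iff _ _).mp h))
    simp [hc, hm]

-- B's bucket dict holds, per size, all its occurrence ids, keyed in first-occurrence order
lemma gpDictB_spec (people : List Int) :
    (∀ s : Int, (gpDictB people).getD s [] = gpOcc s people) ∧
      (gpDictB people).keys = PySem.List.dedup people := by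
  induction people using List.reverseRecOn with
  | nil =>
      refine ⟨fun s => ?_, ?_⟩
      · simp [gpDictB, PySem.List.enumerate_nil, PySem.Dict.getD_empty, gpOcc]
      · rfl
  | append_singleton people x ih =>
      obtain ⟨ih1, ih2⟩ := ih
      have hstep : gpDictB (people ++ [x]) =
          ((gpDictB people).setdefault x ([] : List Int)).insert x
            (((gpDictB people).setdefault x ([] : List Int)).getD x []
              ++ [(people.length : Int)]) := by
        simp [gpDictB, PySem.List.enumerate_append, PySem.List.enumerate_cons,
          PySem.List.enumerate_nil, List.foldl_append]
      have hgd : ∀ (d : PySem.Dict Int (List Int)) (v d0 : List Int) (s : Int), s ≠ x →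
          (d.setdefault x v).getD s d0 = d.getD s d0 := fun d v d0 s hne =>
        congrArg (fun o => o.getD d0) (PySem.Dict.get?_setdefault_of_ne d v hne)
      rw [hstep]
      refine ⟨fun s => ?_, ?_⟩
      · rw [PySem.Dict.getD_insert]
        rcases eq_or_ne s x with he | he
        · rw [if_pos he, he, PySem.Dict.getD_setdefault_self, ih1 x, gpOcc_append, if_pos rfl]
        · rw [if_neg he, hgd _ _ _ _ he, ih1 s, gpOcc_append, if_neg (fun h => he h.symm),
            List.append_nil]
      · have hcon : ((gpDictB people).setdefault x ([] : List Int)).contains x = true := by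
          rw [PySem.Dict.contains_setdefault]; simp
        rw [PySem.Dict.keys_insert_of_contains _ _ hcon, PySem.Dict.keys_setdefault, ih2,
          gp_dedup_snoc]
        by_cases hm : x ∈ people
        · rw [if_pos ((PySem.Dict.contains_iff_mem_keys _ _).mpr
            (ih2 ▸ (PySem.List.mem_dedup _ _).mpr hm)), if_pos hm, List.append_nil]
        · rw [if_neg (fun h => hm ((PySem.List.mem_dedup _ _).mp
            (ih2 ▸ (PySem.Dict.contains_iff_mem_keys _ _).mp h))), if_neg hm]

-- normal form of B's second loop
lemma gpChunksB (people : List Int) :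
    ((gpDictB people).items.foldl (fun chunks q =>
      let s := q.1
      let ids := q.2
      if 0 < s then
        (PySem.List.pyRange 0 (PySem.Int.floordiv (ids.length : Int) s) 1).foldl
          (fun chunks k => chunks ++ [PySem.List.slice ids (some (k * s)) (some ((k + 1) * s))])
          chunks
      else chunks) ([] : List (List Int))) = gpAllChunks people := by
  obtain ⟨h1, h2⟩ := gpDictB_spec people
  have hitems : (gpDictB people).items
      = (PySem.List.dedup people).map (fun s => (s, gpOcc s people)) := by
    rw [PySem.Dict.items_eq_map_keys _ (h2 ▸ PySem.List.nodup_dedup people) ([] : List Int), h2]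
    exact List.map_congr_left (fun s _ => by rw [h1 s])
  rw [hitems, List.foldl_map]
  refine Eq.trans (PySem.List.foldl_congr_mem _ _
    (fun acc s => acc ++ gpChunksOf s people) [] ?_) ?_
  · intro acc s _
    by_cases hs : 0 < s
    · obtain ⟨m, rfl⟩ := Int.eq_ofNat_of_zero_le hs.le
      simp only
      rw [if_pos hs]
      unfold gpChunksOf
      rw [if_pos hs]
      rw [show ((gpOcc (↑m) people).length : Int) = (((gpOcc (↑m) people).length : Nat) : Int)
        from rfl]
      rw [PySem.Int.floordiv_natCast, PySem.List.pyRange_zero_natCast, List.foldl_map,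
        PySem.List.foldl_append_singleton_eq_map]
      congr 1
      apply List.map_congr_left
      intro k _
      rw [show ((k : Int) * (m : Int)) = ((k * m : Nat) : Int) by push_cast; ring]
      rw [show (((k : Int)) + 1) * (m : Int) = (((k + 1) * m : Nat) : Int) by push_cast; ring]
      rw [PySem.List.slice_natCast, Int.toNat_natCast]
      congr 1
      rw [Nat.succ_mul]
      omega
    · simp only
      rw [if_neg hs]
      unfold gpChunksOf
      rw [if_neg hs, List.append_nil]
  · rw [PySem.List.foldl_append_eq_flatMap, List.nil_append]
    rfl

lemma gp_flatMap_perm {t : List (List Int)} (l : List Int) (hnd : l.Nodup) (x : Int) (hx : x ∈ l)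
    (f f' : Int → List (List Int)) (hne : ∀ s ∈ l, s ≠ x → f' s = f s)
    (hfx : f' x = f x ++ t) : (l.flatMap f').Perm (l.flatMap f ++ t) := by
  obtain ⟨l1, l2, rfl⟩ := List.append_of_mem hx
  have h1 := List.nodup_append.mp hnd
  have hx1 : x ∉ l1 := fun h => h1.2.2 x h x List.mem_cons_self rfl
  rw [List.flatMap_append, List.flatMap_cons, hfx]
  rw [List.flatMap_congr (l := l1) (f := f') (g := f)
    (fun a ha => hne a (List.mem_append_left _ ha) (fun he => hx1 (he ▸ ha)))]
  rw [List.flatMap_congr (l := l2) (f := f') (g := f)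
    (fun a ha => hne a (List.mem_append_right _ (List.mem_cons_of_mem _ ha))
      (fun he => (List.nodup_cons.mp h1.2.1).1 (he ▸ ha)))]
  have e1 : l1.flatMap f ++ ((f x ++ t) ++ l2.flatMap f)
      = l1.flatMap f ++ (f x ++ (t ++ l2.flatMap f)) := by simp [List.append_assoc]
  have e2 : (l1.flatMap f ++ (f x ++ l2.flatMap f)) ++ t
      = l1.flatMap f ++ (f x ++ (l2.flatMap f ++ t)) := by simp [List.append_assoc]
  rw [show List.flatMap f (l1 ++ x :: l2) = l1.flatMap f ++ (f x ++ l2.flatMap f) by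
    simp [List.flatMap_append, List.flatMap_cons]]
  rw [e1, e2]
  exact List.Perm.append_left _ (List.Perm.append_left _ List.perm_append_comm)

lemma gpChunksOf_snoc (x : Int) (people : List Int) :
    gpChunksOf x (people ++ [x]) = gpChunksOf x people ++ gpNew x people := by
  by_cases hx : 0 < x
  · obtain ⟨m, rfl⟩ := Int.eq_ofNat_of_zero_le hx.le
    have hm : 0 < m := by omega
    unfold gpChunksOf gpNew
    rw [if_pos hx, if_pos hx, gpOcc_append, if_pos rfl]
    simp only [Int.toNat_natCast, List.length_append, List.length_singleton]
    have hdm := Nat.div_add_mod (gpOcc (↑m : Int) people).length m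
    have hdmul : (gpOcc (↑m : Int) people).length / m * m
        = m * ((gpOcc (↑m : Int) people).length / m) := Nat.mul_comm _ _
    have hdle := Nat.div_mul_le_self (gpOcc (↑m : Int) people).length m
    by_cases hfull : ((gpOcc (↑m : Int) people).length + 1) % m = 0
    · have hr : (gpOcc (↑m : Int) people).length % m + 1 = m := by
        rw [gp_mod_succ _ _ hm] at hfull
        by_contra hne
        rw [if_neg hne] at hfull
        omega
      have hq : ((gpOcc (↑m : Int) people).length + 1) / m
          = (gpOcc (↑m : Int) people).length / m + 1 := by
        have he : (gpOcc (↑m : Int) people).length + 1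
            = m * ((gpOcc (↑m : Int) people).length / m + 1) := by
          rw [Nat.mul_succ]; omega
        rw [he, Nat.mul_div_cancel_left _ hm]
      rw [hq, if_pos ⟨hx, hfull⟩, List.range_succ, List.map_append]
      congr 1
      · apply List.map_congr_left
        intro k hk
        have hkle : (k + 1) * m ≤ (gpOcc (↑m : Int) people).length := by
          have h1 : k + 1 ≤ (gpOcc (↑m : Int) people).length / m := List.mem_range.mp hk
          calc (k + 1) * m ≤ ((gpOcc (↑m : Int) people).length / m) * m :=
                Nat.mul_le_mul_right _ h1
            _ ≤ _ := hdle
        have hsucc : (k + 1) * m = k * m + m := Nat.succ_mul k m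
        rw [List.drop_append_of_le_length (by omega)]
        rw [List.take_append_of_le_length (by simp [List.length_drop]; omega)]
      · simp only [List.map_cons, List.map_nil]
        rw [List.drop_append_of_le_length (show (gpOcc (↑m : Int) people).length / m * m
          ≤ (gpOcc (↑m : Int) people).length from hdle)]
        rw [List.take_of_length_le (by simp [List.length_drop]; omega)]
        unfold gpPend
        rw [if_pos hx]
        simp only [Int.toNat_natCast]
        have heq : (gpOcc (↑m : Int) people).length / m * m
            = (gpOcc (↑m : Int) people).length - (gpOcc (↑m : Int) people).length % m := by
          omega
        rw [heq]
    · have hr : (gpOcc (↑m : Int) people).length % m + 1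
          = ((gpOcc (↑m : Int) people).length + 1) % m := by
        rw [gp_mod_succ _ _ hm]
        by_cases h : (gpOcc (↑m : Int) people).length % m + 1 = m
        · rw [gp_mod_succ _ _ hm, if_pos h] at hfull; omega
        · rw [if_neg h]
      have hrlt : (gpOcc (↑m : Int) people).length % m + 1 < m := by
        have := Nat.mod_lt ((gpOcc (↑m : Int) people).length + 1) hm
        have h2 := Nat.mod_lt (gpOcc (↑m : Int) people).length hm
        omega
      have hq : ((gpOcc (↑m : Int) people).length + 1) / m
          = (gpOcc (↑m : Int) people).length / m := by
        have he : (gpOcc (↑m : Int) people).length + 1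
            = m * ((gpOcc (↑m : Int) people).length / m)
              + ((gpOcc (↑m : Int) people).length % m + 1) := by omega
        rw [he, Nat.mul_add_div hm, Nat.div_eq_of_lt hrlt, Nat.add_zero]
      rw [hq, if_neg (fun h => hfull h.2), List.append_nil]
      apply List.map_congr_left
      intro k hk
      have hkle : (k + 1) * m ≤ (gpOcc (↑m : Int) people).length := by
        have h1 : k + 1 ≤ (gpOcc (↑m : Int) people).length / m := List.mem_range.mp hk
        calc (k + 1) * m ≤ ((gpOcc (↑m : Int) people).length / m) * m :=
              Nat.mul_le_mul_right _ h1
          _ ≤ _ := hdle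
      have hsucc : (k + 1) * m = k * m + m := Nat.succ_mul k m
      rw [List.drop_append_of_le_length (by omega)]
      rw [List.take_append_of_le_length (by simp [List.length_drop]; omega)]
  · unfold gpChunksOf gpNew
    rw [if_neg hx, if_neg hx, if_neg (fun h => hx h.1), List.append_nil]

lemma gpAllChunks_snoc (people : List Int) (x : Int) :
    (gpAllChunks (people ++ [x])).Perm (gpAllChunks people ++ gpNew x people) := by
  unfold gpAllChunks
  rw [gp_dedup_snoc]
  have hne : ∀ s ∈ PySem.List.dedup people, s ≠ x →
      gpChunksOf s (people ++ [x]) = gpChunksOf s people := by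
    intro s _ hs
    have ho : gpOcc s (people ++ [x]) = gpOcc s people := by
      rw [gpOcc_append, if_neg (fun h => hs h.symm), List.append_nil]
    unfold gpChunksOf
    rw [ho]
  by_cases hm : x ∈ people
  · rw [if_pos hm, List.append_nil]
    exact gp_flatMap_perm (PySem.List.dedup people) (PySem.List.nodup_dedup people) x
      ((PySem.List.mem_dedup _ _).mpr hm) _ _ hne (gpChunksOf_snoc x people)
  · rw [if_neg hm, List.flatMap_append, List.flatMap_cons, List.flatMap_nil, List.append_nil]
    rw [List.flatMap_congr (fun s hs => hne s hs
      (fun he => hm (he ▸ (PySem.List.mem_dedup _ _).mp hs)))]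
    rw [gpChunksOf_snoc x people]
    have h0 : gpChunksOf x people = [] := by
      simp [gpChunksOf, gpOcc_nil_of_not_mem x people hm]
    rw [h0, List.nil_append]

lemma gp_inv (people : List Int) :
    (∀ s : Int, (gpFoldA people).1.getD s [] = gpPend s people) ∧
      (gpFoldA people).2.Perm (gpAllChunks people) ∧
      List.Pairwise (fun a b => gpKey a < gpKey b) (gpFoldA people).2 ∧
      (∀ c ∈ (gpFoldA people).2, gpKey c < (people.length : Int)) := by
  induction people using List.reverseRecOn with
  | nil =>
      refine ⟨fun s => ?_, by simp [gpFoldA, gpAllChunks, PySem.List.enumerate_nil], by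
        simp [gpFoldA, PySem.List.enumerate_nil], by simp [gpFoldA, PySem.List.enumerate_nil]⟩
      simp [gpFoldA, PySem.List.enumerate_nil, PySem.Dict.getD_empty, gpPend, gpOcc]
  | append_singleton people x ih =>
      obtain ⟨ih1, ihPerm, ihPw, ihB⟩ := ih
      have hA : gpFoldA (people ++ [x]) = gpStepA (gpFoldA people) (0 + (people.length : Int), x) := by
        simp [gpFoldA, PySem.List.enumerate_append, PySem.List.enumerate_cons,
          PySem.List.enumerate_nil, List.foldl_append]
      have hG0 : ∀ s : Int,
          (if (gpFoldA people).1.contains x = true then (gpFoldA people).1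
           else (gpFoldA people).1.insert x ([] : List Int)).getD s [] = gpPend s people := by
        intro s
        by_cases hc : (gpFoldA people).1.contains x = true
        · simp [hc, ih1]
        · have hxe : (gpFoldA people).1.getD x [] = [] :=
            PySem.Dict.getD_of_not_contains _ _ (by simpa using hc)
          simp only [hc, Bool.false_eq_true, if_false]
          rw [PySem.Dict.getD_insert]
          split_ifs with he
          · subst he; rw [← ih1 s, hxe]
          · exact ih1 s
      have hPendNe : ∀ s : Int, s ≠ x → gpPend s (people ++ [x]) = gpPend s people := by
        intro s hs
        have : gpOcc s (people ++ [x]) = gpOcc s people := by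
          rw [gpOcc_append]; simp [Ne.symm hs]
        simp [gpPend, this]
      have hOccX : gpOcc x (people ++ [x]) = gpOcc x people ++ [(people.length : Int)] := by
        rw [gpOcc_append]; simp
      have hSnoc := gpAllChunks_snoc people x
      have hLen : (((people ++ [x]).length : Int)) = (people.length : Int) + 1 := by
        simp
      rw [hA]
      simp only [gpStepA, zero_add]
      simp only [hG0]
      by_cases hx : 0 < x
      · -- positive size
        obtain ⟨m, rfl⟩ := Int.eq_ofNat_of_zero_le hx.le
        have hm : 0 < m := by omega
        have hmodlt : (gpOcc (↑m) people).length % m < m := Nat.mod_lt _ hm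
        have hmodle := Nat.mod_le (gpOcc (↑m) people).length m
        have hpl : (gpPend (↑m) people).length = (gpOcc (↑m) people).length % m := by
          simp [gpPend, hm, Int.toNat_natCast]; omega
        have hcondA : ((↑(gpPend (↑m) people ++ [(people.length : Int)]).length : Int) = (m : Int))
            ↔ ((gpOcc (↑m) people).length % m + 1 = m) := by
          simp only [List.length_append, List.length_singleton, hpl]
          constructor <;> intro h <;> omega
        by_cases hfull : (gpOcc (↑m) people).length % m + 1 = m
        · rw [if_pos (hcondA.2 hfull)]
          have hocc' : ((gpOcc (↑m) people).length + 1) % m = 0 := by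
            rw [gp_mod_succ _ _ hm]; simp [hfull]
          have hNew : gpNew (↑m) people
              = [gpPend (↑m) people ++ [(people.length : Int)]] := by
            unfold gpNew
            rw [if_pos ⟨hx, by simpa [Int.toNat_natCast] using hocc'⟩]
          have hKeyNew : gpKey (gpPend (↑m) people ++ [(people.length : Int)])
              = (people.length : Int) := PySem.List.pyGetD_neg_one_append_singleton _ _ _
          refine ⟨fun s => ?_, ?_, ?_, ?_⟩
          · rw [PySem.Dict.insert_insert_self, PySem.Dict.getD_insert]
            rcases eq_or_ne s (m : Int) with he | he
            · rw [if_pos he, he]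
              unfold gpPend
              rw [if_pos hx, hOccX]
              simp only [List.length_append, List.length_singleton, Int.toNat_natCast, hocc',
                Nat.sub_zero]
              rw [List.drop_eq_nil_of_le (by simp)]
            · rw [if_neg he, hG0 s, hPendNe s he]
          · refine (List.Perm.append ihPerm (List.Perm.refl _)).trans ?_
            rw [← hNew]
            exact hSnoc.symm
          · refine List.pairwise_append.mpr ⟨ihPw, List.pairwise_singleton _ _, ?_⟩
            intro a ha b hb
            rw [List.mem_singleton] at hb
            subst hb
            rw [hKeyNew]
            exact ihB a ha
          · intro c hc
            rw [hLen]
            rcases List.mem_append.mp hc with h | h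
            · have := ihB c h; omega
            · rw [List.mem_singleton] at h
              subst h
              rw [hKeyNew]
              omega
        · rw [if_neg (fun h => hfull (hcondA.1 h))]
          have hocc' : ((gpOcc (↑m) people).length + 1) % m
              = (gpOcc (↑m) people).length % m + 1 := by
            rw [gp_mod_succ _ _ hm]; simp [hfull]
          have hNew : gpNew (↑m) people = [] := by
            unfold gpNew
            rw [if_neg (fun h => by
              have h2 := h.2
              rw [Int.toNat_natCast, hocc'] at h2
              omega)]
          refine ⟨fun s => ?_, ?_, ihPw, ?_⟩
          · rw [PySem.Dict.getD_insert]
            rcases eq_or_ne s (m : Int) with he | he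
            · rw [if_pos he, he]
              conv_rhs => unfold gpPend
              rw [if_pos hx, hOccX]
              simp only [List.length_append, List.length_singleton, Int.toNat_natCast, hocc']
              rw [List.drop_append_of_le_length (by omega)]
              unfold gpPend
              rw [if_pos hx]
              simp only [Int.toNat_natCast]
              congr 2
              omega
            · rw [if_neg he, hG0 s, hPendNe s he]
          · refine ihPerm.trans ?_
            have := hSnoc.symm
            rw [hNew, List.append_nil] at this
            exact this
          · intro c hc
            have := ihB c hc
            rw [hLen]
            omega
      · -- size <= 0: never emitted
        have hxlen : ¬ ((↑(gpPend x people ++ [(people.length : Int)]).length : Int) = x) := by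
          have h1 : 0 < (gpPend x people ++ [(people.length : Int)]).length := by simp
          intro h; omega
        rw [if_neg hxlen]
        have hNew : gpNew x people = [] := by
          unfold gpNew
          rw [if_neg (fun h => hx h.1)]
        refine ⟨fun s => ?_, ?_, ihPw, ?_⟩
        · rw [PySem.Dict.getD_insert]
          rcases eq_or_ne s x with he | he
          · rw [if_pos he, he]
            simp [gpPend, hx, hOccX]
          · rw [if_neg he, hG0 s, hPendNe s he]
        · refine ihPerm.trans ?_
          have := hSnoc.symm
          rw [hNew, List.append_nil] at this
          exact this
        · intro c hc
          have := ihB c hc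
          rw [hLen]
          omega

-- ===== VERDICT (by name: the statement is the Claim_ definition above) =====
theorem group_people_spec : Claim_equal_group_people := by
  intro people _
  unfold Spec_group_people
  obtain ⟨-, hperm, hpw, -⟩ := gp_inv people
  show (gpFoldA people).2 = group_people_alt people
  have halt : group_people_alt people
      = PySem.List.sorted (gpAllChunks people) (fun c => PySem.List.pyGetD c (-1) 0) := by
    rw [← gpChunksB people]
    rfl
  rw [halt]
  exact (PySem.List.sorted_eq_of_perm_of_pairwise_lt _ _ _ hperm hpw).symm
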